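-- pv_equiv track=rewrite | github.com/drew2323/mlroom | mlroom/utils/mlutils.py | concatenate_loaded_data
-- ===== SOURCE A (Python) =====
-- def concatenate_loaded_data(sources):
--     """
--     Transforms original list structure (days as list)
--     [dict(area1=dict(time=[], feature1=[]), area2=dict(time=[], feature1))]
--
--     by creating one flat strucutre and day indexes variable
--     dict(area1=dict(time=[], feature1=[]), area2=dict(time=[], feature1))
--
--     day_indexes = {bars: [(0,234),(234,545),(545,88)]}
--
--         [
--         {'bars': (0, 4373), 'cbar_indicators': (0, 64559), 'indicators': (0, 4373)},
--         {'bars': (4373, 8432), 'cbar_indicators': (64559, 101597), 'indicators': (4373, 8432)}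
--         ]
--
--     """
--     if not sources:
--         raise ValueError("The sources list is empty")
--
--     # Dynamically determine the keys from the first day's data
--     top_level_keys = sources[0].keys()
--     concatenated = {key: {} for key in top_level_keys}
--     day_indexes = []
--
--     for day_index, day_data in enumerate(sources):
--         day_info = {}
--         for key in top_level_keys:
--             # Determine the start index
--             if day_index == 0:
--                 start_index = 0
--             else:
--                 # The start index for the current day is the end index of the previous day + 1
--                 start_index = day_indexes[-1][key][1]
--
--             for feature, values in day_data[key].items():
--                 # Concatenate feature data
--                 if feature not in concatenated[key]:
--                     concatenated[key][feature] = values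
--                 else:
--                     concatenated[key][feature].extend(values)
--
--             # The end index for the current day
--             end_index = start_index + len(day_data[key]['time'])
--             day_info[key] = (start_index, end_index)
--         day_indexes.append(day_info)
--     return concatenated, day_indexes
-- ===== SOURCE B (Python) =====
-- def concatenate_loaded_data(sources):
--     if not sources:
--         raise ValueError("The sources list is empty")
--
--     top_level_keys = list(sources[0].keys())
--
--     # Pass 1: day index ranges from cumulative offsets of the per-day 'time'
--     # lengths (done before any concatenation mutates the input lists).
--     per_key_ranges = {}
--     for key in top_level_keys:
--         offsets = [0]
--         for day_data in sources:
--             offsets.append(offsets[-1] + len(day_data[key]['time']))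
--         per_key_ranges[key] = list(zip(offsets, offsets[1:]))
--     day_indexes = [{key: per_key_ranges[key][i] for key in top_level_keys}
--                    for i in range(len(sources))]
--
--     # Pass 2: concatenation, key by key (first occurrence keeps the list
--     # object, later ones extend it, as in the original).
--     concatenated = {}
--     for key in top_level_keys:
--         merged = {}
--         for day_data in sources:
--             for feature, values in day_data[key].items():
--                 if feature not in merged:
--                     merged[feature] = values
--                 else:
--                     merged[feature].extend(values)
--         concatenated[key] = merged
--     return concatenated, day_indexes
-- ===== Notes on version B (the rewrite author's own statement) =====
-- stated objective: alternative
-- what changed: B replaces A's single day-major loop (which threads an incremental start index through the growing day_indexes list while concatenating) by two independent passes: day index ranges are computed first from per-key cumulative offsets of the 'time' lengths, paired into (start,end) ranges and transposed into per-day dicts, and the concatenation is then done key by key instead of day by day.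
import Mathlib
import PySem

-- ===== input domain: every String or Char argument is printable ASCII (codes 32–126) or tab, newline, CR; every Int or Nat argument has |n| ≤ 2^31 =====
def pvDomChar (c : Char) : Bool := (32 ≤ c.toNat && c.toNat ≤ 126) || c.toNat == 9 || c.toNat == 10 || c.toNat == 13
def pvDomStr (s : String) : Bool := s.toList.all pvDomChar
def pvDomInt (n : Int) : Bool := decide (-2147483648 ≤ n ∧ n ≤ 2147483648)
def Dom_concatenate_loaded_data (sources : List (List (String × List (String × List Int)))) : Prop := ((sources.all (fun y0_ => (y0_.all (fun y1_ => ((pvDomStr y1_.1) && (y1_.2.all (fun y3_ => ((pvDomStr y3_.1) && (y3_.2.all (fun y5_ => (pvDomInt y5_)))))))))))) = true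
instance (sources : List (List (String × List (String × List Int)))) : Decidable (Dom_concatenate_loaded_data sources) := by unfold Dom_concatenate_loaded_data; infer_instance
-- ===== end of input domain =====

-- B computes the day index ranges in a separate first pass (per-key cumulative
-- offsets paired into ranges, then transposed into per-day dicts) and then
-- concatenates key by key, instead of A's single day-major loop with an
-- incremental start index; objective: simpler decomposition, same cost.
-- Both Pythons mutate the first day's inner lists in place (via extend); the
-- equivalence proved here is about the RETURN value only (B performs the same
-- mutation).

-- ===== PORT A =====
-- one shared row-update: concatenated[key][feature] = values / .extend(values)
def pvFeatStep (m : PySem.Dict String (List Int)) (fv : String × List Int) :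
    PySem.Dict String (List Int) :=
  if m.contains fv.1 = false then m.insert fv.1 fv.2
  else m.modify fv.1 [] (· ++ fv.2)

def concatenate_loaded_data (sources : List (List (String × List (String × List Int)))) : (List (String × List (String × List Int))) × (List (List (String × Int × Int))) :=
  match sources with
  | [] => ([], [])  -- Python raises ValueError here (excluded by Pre_)
  | first :: _ =>
    let keys : List String := (PySem.Dict.mk first).keys
    -- concatenated = {key: {} for key in top_level_keys}
    let conc0 : PySem.Dict String (PySem.Dict String (List Int)) :=
      keys.foldl (fun d k => d.insert k PySem.Dict.empty) PySem.Dict.empty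
    let st :=
      (PySem.List.enumerate sources).foldl
        (fun (st : PySem.Dict String (PySem.Dict String (List Int)) ×
                    List (PySem.Dict String (Int × Int))) p =>
          let dayData := PySem.Dict.mk p.2
          let st2 :=
            keys.foldl
              (fun (st2 : PySem.Dict String (PySem.Dict String (List Int)) ×
                          PySem.Dict String (Int × Int)) key =>
                -- start_index: 0 for day 0, else day_indexes[-1][key][1]
                let startIndex : Int :=
                  if p.1 == 0 then 0
                  else ((PySem.List.pyGetD st.2 (-1) PySem.Dict.empty).getD key (0, 0)).2
                -- for feature, values in day_data[key].items(): …
                let conc :=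
                  (dayData.getD key []).foldl
                    (fun conc fv =>
                      conc.insert key (pvFeatStep (conc.getD key PySem.Dict.empty) fv))
                    st2.1
                let endIndex : Int :=
                  startIndex + ((PySem.Dict.mk (dayData.getD key [])).getD "time" []).length
                (conc, st2.2.insert key (startIndex, endIndex)))
              (st.1, PySem.Dict.empty)
          (st2.1, st.2 ++ [st2.2]))
        (conc0, [])
    (st.1.items.map (fun kv => (kv.1, kv.2.items)), st.2.map PySem.Dict.items)

-- ===== PORT B =====
def concatenate_loaded_data_alt (sources : List (List (String × List (String × List Int)))) : (List (String × List (String × List Int))) × (List (List (String × Int × Int))) :=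
  match sources with
  | [] => ([], [])  -- same ValueError guard as A
  | first :: _ =>
    let keys : List String := (PySem.Dict.mk first).keys
    -- pass 1: per-key cumulative offsets, paired into (start, end) ranges
    let perKeyRanges : PySem.Dict String (List (Int × Int)) :=
      keys.foldl
        (fun d key =>
          let offsets : List Int :=
            sources.foldl
              (fun offs day =>
                offs ++ [PySem.List.pyGetD offs (-1) 0 +
                  ((PySem.Dict.mk ((PySem.Dict.mk day).getD key [])).getD "time" []).length])
              [0]
          d.insert key (offsets.zip offsets.tail))
        PySem.Dict.empty
    -- transpose: per-day dicts of ranges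
    let dayIndexes : List (List (String × Int × Int)) :=
      (List.range sources.length).map
        (fun i =>
          (keys.foldl
            (fun d key =>
              d.insert key (PySem.List.pyGetD (perKeyRanges.getD key []) (i : Int) (0, 0)))
            PySem.Dict.empty).items)
    -- pass 2: concatenation, key by key
    let concatenated : List (String × List (String × List Int)) :=
      (keys.foldl
        (fun c key =>
          c.insert key
            (sources.foldl
              (fun merged day =>
                ((PySem.Dict.mk day).getD key []).foldl pvFeatStep merged)
              PySem.Dict.empty))
        PySem.Dict.empty).items.map (fun kv => (kv.1, kv.2.items))
    (concatenated, dayIndexes)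

-- ===== PRECONDITION & SPEC =====
-- Pre_ excludes: the empty list (A raises ValueError); days missing a key of
-- the first day or whose key-dict lacks 'time' (A raises KeyError); and
-- duplicate keys in any dict (a Python dict cannot hold them, so the assoc-list
-- representation would be accidental).
def Pre_concatenate_loaded_data (sources : List (List (String × List (String × List Int)))) : Prop :=
  sources ≠ [] ∧
  (∀ day ∈ sources, (day.map Prod.fst).Nodup ∧ ∀ kv ∈ day, (kv.2.map Prod.fst).Nodup) ∧
  (∀ day ∈ sources, ∀ kv ∈ sources.headD [],
    (((PySem.Dict.mk day).get? kv.1).bind (fun inner => (PySem.Dict.mk inner).get? "time")).isSome = true)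
instance (sources : List (List (String × List (String × List Int)))) : Decidable (Pre_concatenate_loaded_data sources) := by unfold Pre_concatenate_loaded_data; infer_instance

def pvWitness_concatenate_loaded_data : (List (List (String × List (String × List Int)))) :=
  [[("bars", [("time", [1, 2]), ("close", [5, 6])])],
   [("bars", [("time", [3]), ("close", [7])])]]

def Spec_concatenate_loaded_data (sources : List (List (String × List (String × List Int)))) (out : (List (String × List (String × List Int))) × (List (List (String × Int × Int)))) : Prop := out = concatenate_loaded_data_alt sources
instance (sources : List (List (String × List (String × List Int)))) (out : (List (String × List (String × List Int))) × (List (List (String × Int × Int)))) : Decidable (Spec_concatenate_loaded_data sources out) := by unfold Spec_concatenate_loaded_data; infer_instance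

-- ===== CLAIM (what is proved, stated in full; the proofs are below) =====
def Claim_equal_concatenate_loaded_data : Prop := ∀ (sources : List (List (String × List (String × List Int)))), Dom_concatenate_loaded_data sources → Pre_concatenate_loaded_data sources → Spec_concatenate_loaded_data sources (concatenate_loaded_data sources)

-- ===== LEMMAS AND PROOFS =====

theorem pv_witness_ok :
    Dom_concatenate_loaded_data pvWitness_concatenate_loaded_data ∧
    Pre_concatenate_loaded_data pvWitness_concatenate_loaded_data := by
  constructor
  · decide
  · unfold Pre_concatenate_loaded_data; decide

-- helper definitions for the proofs
def pvL (day : List (String × List (String × List Int))) (k : String) : Int :=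
  ((PySem.Dict.mk ((PySem.Dict.mk day).getD k [])).getD "time" []).length

def pvPrefix (s : Int) : List Int → List Int
  | [] => []
  | x :: t => (s + x) :: pvPrefix (s + x) t

def pvRangesFrom (s : Int) : List Int → List (Int × Int)
  | [] => []
  | x :: t => (s, s + x) :: pvRangesFrom (s + x) t

def pvIdx (keys : List String) (start : String → Int) :
    List (List (String × List (String × List Int))) → List (PySem.Dict String (Int × Int))
  | [] => []
  | day :: t =>
      PySem.Dict.mk (keys.map (fun k => (k, (start k, start k + pvL day k)))) ::
        pvIdx keys (fun k => start k + pvL day k) t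

def pvMergeAll (days : List (List (String × List (String × List Int)))) (k : String) :
    PySem.Dict String (List Int) :=
  days.foldl (fun m day => ((PySem.Dict.mk day).getD k []).foldl pvFeatStep m) PySem.Dict.empty

def pvCanon (first : List (String × List (String × List Int)))
    (rest : List (List (String × List (String × List Int)))) :
    (List (String × List (String × List Int))) × (List (List (String × Int × Int))) :=
  ((first.map (fun x => x.1)).map (fun k => (k, (pvMergeAll (first :: rest) k).items)),
   (pvIdx (first.map (fun x => x.1)) (fun _ => 0) (first :: rest)).map PySem.Dict.items)

lemma pv_keys_mk_map {ν : Type} (keys : List String) (f : String → ν) :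
    (PySem.Dict.mk (keys.map (fun k => (k, f k)))).keys = keys := by
  simp [PySem.Dict.keys_mk, Function.comp_def]

lemma pv_getD_mk_map {ν : Type} (keys : List String) (f : String → ν) (hk : keys.Nodup)
    {k : String} (hmem : k ∈ keys) (d : ν) :
    (PySem.Dict.mk (keys.map (fun k => (k, f k)))).getD k d = f k := by
  apply PySem.Dict.getD_of_mem_items
  · exact List.mem_map_of_mem hmem
  · rw [pv_keys_mk_map]; exact hk

lemma pv_foldl_insert_eq_mk {ν : Type} (keys : List String) (f : String → ν) (hk : keys.Nodup) :
    keys.foldl (fun d k => d.insert k (f k)) PySem.Dict.empty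
      = PySem.Dict.mk (keys.map (fun k => (k, f k))) := by
  apply PySem.Dict.ext
  have h := PySem.Dict.items_foldl_insert_fresh keys (fun k => k) f PySem.Dict.empty
    (by intro a _; simp [PySem.Dict.empty, PySem.Dict.contains]) (by simpa using hk)
  simpa [PySem.Dict.empty] using h

lemma pv_foldl_insert_eq_mk' (keys : List String) (hk : keys.Nodup) {ν : Type} (f : String → ν) :
    keys.foldl (fun d k => d.insert k (f k)) PySem.Dict.empty
      = PySem.Dict.mk (keys.map (fun k => (k, f k))) :=
  pv_foldl_insert_eq_mk keys f hk

lemma pv_offsets {b : Type} (f : b → Int) :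
    ∀ (ds : List b) (pre : List Int) (s : Int),
      ds.foldl (fun offs d => offs ++ [PySem.List.pyGetD offs (-1) 0 + f d]) (pre ++ [s])
        = (pre ++ [s]) ++ pvPrefix s (ds.map f) := by
  intro ds
  induction ds with
  | nil => intro pre s; simp [pvPrefix]
  | cons d t ih =>
      intro pre s
      simp only [List.foldl_cons, List.map_cons, pvPrefix]
      rw [PySem.List.pyGetD_neg_one_append_singleton]
      rw [ih (pre ++ [s]) (s + f d)]
      simp

lemma pv_offsets0 {b : Type} (f : b → Int) (ds : List b) :
    ds.foldl (fun offs d => offs ++ [PySem.List.pyGetD offs (-1) 0 + f d]) [0]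
      = 0 :: pvPrefix 0 (ds.map f) := by
  have h := pv_offsets f ds [] 0
  simpa using h

lemma pv_zip_offsets : ∀ (ls : List Int) (s : Int),
    (s :: pvPrefix s ls).zip (pvPrefix s ls) = pvRangesFrom s ls := by
  intro ls
  induction ls with
  | nil => intro s; simp [pvPrefix, pvRangesFrom]
  | cons x t ih =>
      intro s
      simp only [pvPrefix, pvRangesFrom, List.zip_cons_cons]
      rw [ih (s + x)]

lemma pv_idx_ranges (keys : List String) :
    ∀ (days : List (List (String × List (String × List Int)))) (start : String → Int),
      pvIdx keys start days
        = (List.range days.length).map (fun i : Nat =>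
            PySem.Dict.mk (keys.map (fun k =>
              (k, PySem.List.pyGetD (pvRangesFrom (start k) (days.map (fun d => pvL d k)))
                    ((i : Nat) : Int) (0, 0))))) := by
  intro days
  induction days with
  | nil => intro start; simp [pvIdx]
  | cons day t ih =>
      intro start
      simp only [pvIdx, List.length_cons, List.range_succ_eq_map, List.map_cons, List.map_map]
      refine List.cons_eq_cons.mpr ⟨?_, ?_⟩
      · congr 1
        refine List.map_congr_left ?_
        intro k _
        simp [pvRangesFrom, PySem.List.pyGetD_zero_cons]
      · rw [ih (fun k => start k + pvL day k)]
        refine List.map_congr_left ?_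
        intro i _
        simp only [Function.comp]
        congr 1
        refine List.map_congr_left ?_
        intro k _
        simp only [pvRangesFrom, PySem.List.pyGetD_natCast]
        simp [Nat.succ_eq_add_one]

lemma pv_alt_eq_canon (first : List (String × List (String × List Int)))
    (rest : List (List (String × List (String × List Int))))
    (hk : (first.map (fun x => x.1)).Nodup) :
    concatenate_loaded_data_alt (first :: rest) = pvCanon first rest := by
  simp only [concatenate_loaded_data_alt, PySem.Dict.keys_mk]
  simp only [pv_foldl_insert_eq_mk' _ hk]
  refine Prod.ext ?_ ?_
  · simp [pvCanon, pvMergeAll, List.map_map, Function.comp_def]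
  · simp only [pvCanon]
    rw [pv_idx_ranges (first.map (fun x => x.1)) (first :: rest) (fun _ => 0)]
    conv_rhs => rw [List.map_map]
    refine List.map_congr_left ?_
    intro i _
    simp only [Function.comp_apply]
    refine List.map_congr_left ?_
    intro k hkmem
    rw [pv_getD_mk_map _ _ hk hkmem]
    rw [pv_offsets0 (fun day => (((PySem.Dict.mk ((PySem.Dict.mk day).getD k [])).getD "time" []).length : Int)) (first :: rest)]
    rw [List.tail_cons, pv_zip_offsets]
    rfl

lemma pv_get?_mk_append {ν : Type} (pre l : List (String × ν)) (k : String)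
    (h : ∀ p ∈ pre, p.1 ≠ k) :
    (PySem.Dict.mk (pre ++ l)).get? k = (PySem.Dict.mk l).get? k := by
  simp only [PySem.Dict.get?, List.find?_append]
  have hn : pre.find? (fun p => p.1 == k) = none := by
    rw [List.find?_eq_none]
    intro p hp
    simpa using h p hp
  simp [hn]

lemma pv_insert_mk {ν : Type} (pre tl : List (String × ν)) (k : String) (v u : ν)
    (hpre : ∀ p ∈ pre, p.1 ≠ k) (htl : ∀ p ∈ tl, p.1 ≠ k) :
    (PySem.Dict.mk (pre ++ (k, v) :: tl)).insert k u = PySem.Dict.mk (pre ++ (k, u) :: tl) := by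
  apply PySem.Dict.ext
  have hc : (PySem.Dict.mk (pre ++ (k, v) :: tl)).contains k = true := by
    simp [PySem.Dict.contains_mk]
  rw [PySem.Dict.items_insert_of_contains _ u hc]
  show List.map _ (pre ++ (k, v) :: tl) = _
  rw [List.map_append, List.map_cons]
  congr 1
  · refine (List.map_congr_left ?_).trans (List.map_id _)
    intro p hp
    have hne : (p.1 == k) = false := beq_eq_false_iff_ne.mpr (hpre p hp)
    simp [hne]
  · congr 1
    · simp
    · refine (List.map_congr_left ?_).trans (List.map_id _)
      intro p hp
      have hne : (p.1 == k) = false := beq_eq_false_iff_ne.mpr (htl p hp)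
      simp [hne]

lemma pv_inner_loop (key : String) (items : List (String × List Int)) :
    ∀ (pre tl : List (String × PySem.Dict String (List Int))) (v : PySem.Dict String (List Int)),
      (∀ p ∈ pre, p.1 ≠ key) → (∀ p ∈ tl, p.1 ≠ key) →
      items.foldl (fun conc fv => conc.insert key (pvFeatStep (conc.getD key PySem.Dict.empty) fv))
          (PySem.Dict.mk (pre ++ (key, v) :: tl))
        = PySem.Dict.mk (pre ++ (key, items.foldl pvFeatStep v) :: tl) := by
  induction items with
  | nil => intro pre tl v _ _; rfl
  | cons fv t ih =>
      intro pre tl v hpre htl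
      simp only [List.foldl_cons]
      have hget : (PySem.Dict.mk (pre ++ (key, v) :: tl)).getD key PySem.Dict.empty = v := by
        rw [PySem.Dict.getD_eq_get?_getD, pv_get?_mk_append pre _ key hpre,
          PySem.Dict.get?_mk_cons]
        simp
      rw [hget, pv_insert_mk pre tl key v _ hpre htl]
      exact ih pre tl (pvFeatStep v fv) hpre htl

lemma pv_conc_day_gen (day : List (String × List (String × List Int))) :
    ∀ (ks : List String) (pre : List (String × PySem.Dict String (List Int)))
      (v : String → PySem.Dict String (List Int)),
      ks.Nodup → (∀ p ∈ pre, p.1 ∉ ks) →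
      ks.foldl
          (fun c key =>
            ((PySem.Dict.mk day).getD key []).foldl
              (fun conc fv => conc.insert key (pvFeatStep (conc.getD key PySem.Dict.empty) fv)) c)
          (PySem.Dict.mk (pre ++ ks.map (fun k => (k, v k))))
        = PySem.Dict.mk (pre ++ ks.map (fun k =>
            (k, ((PySem.Dict.mk day).getD k []).foldl pvFeatStep (v k)))) := by
  intro ks
  induction ks with
  | nil => intro pre v _ _; rfl
  | cons k kt ih =>
      intro pre v hnd hpre
      simp only [List.foldl_cons, List.map_cons]
      rw [pv_inner_loop k _ pre (kt.map (fun k' => (k', v k'))) (v k)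
        (fun p hp => by simpa using fun h => (hpre p hp) (by simp [h]))
        (fun p hp => by
          obtain ⟨k', hk', rfl⟩ := List.mem_map.mp hp
          intro h
          exact (List.nodup_cons.mp hnd).1 (h ▸ hk'))]
      rw [show pre ++ (k, ((PySem.Dict.mk day).getD k []).foldl pvFeatStep (v k)) :: kt.map (fun k' => (k', v k'))
            = (pre ++ [(k, ((PySem.Dict.mk day).getD k []).foldl pvFeatStep (v k))]) ++ kt.map (fun k' => (k', v k')) by simp]
      rw [ih (pre ++ [(k, ((PySem.Dict.mk day).getD k []).foldl pvFeatStep (v k))]) v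
        (List.nodup_cons.mp hnd).2
        (by
          intro p hp
          rcases List.mem_append.mp hp with h | h
          · intro hmem
            exact hpre p h (List.mem_cons_of_mem _ hmem)
          · rcases List.mem_singleton.mp h with rfl
            simpa using (List.nodup_cons.mp hnd).1)]
      simp

lemma pv_A_loop (keys : List String) (hk : keys.Nodup) :
    ∀ (days : List (List (String × List (String × List Int)))) (s : Int), 0 ≤ s →
    ∀ (v : String → PySem.Dict String (List Int))
      (acc : List (PySem.Dict String (Int × Int))) (start : String → Int),
      (∀ k ∈ keys,
        (if (s == 0) = true then (0 : Int)
         else ((PySem.List.pyGetD acc (-1) PySem.Dict.empty).getD k ((0 : Int), (0 : Int))).2) = start k) →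
      List.foldl
        (fun st p =>
          ((List.foldl
                (fun st2 key =>
                  (List.foldl
                      (fun conc fv => conc.insert key (pvFeatStep (conc.getD key PySem.Dict.empty) fv))
                      st2.1 ((PySem.Dict.mk p.2).getD key []),
                    st2.2.insert key
                      (if (p.1 == 0) = true then (0 : Int)
                       else ((PySem.List.pyGetD st.2 (-1) PySem.Dict.empty).getD key ((0 : Int), (0 : Int))).2,
                       (if (p.1 == 0) = true then (0 : Int)
                        else ((PySem.List.pyGetD st.2 (-1) PySem.Dict.empty).getD key ((0 : Int), (0 : Int))).2) +
                         ((PySem.Dict.mk ((PySem.Dict.mk p.2).getD key [])).getD "time" []).length)))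
                (st.1, PySem.Dict.empty) keys).1,
            st.2 ++
              [(List.foldl
                    (fun st2 key =>
                      (List.foldl
                          (fun conc fv => conc.insert key (pvFeatStep (conc.getD key PySem.Dict.empty) fv))
                          st2.1 ((PySem.Dict.mk p.2).getD key []),
                        st2.2.insert key
                          (if (p.1 == 0) = true then (0 : Int)
                           else ((PySem.List.pyGetD st.2 (-1) PySem.Dict.empty).getD key ((0 : Int), (0 : Int))).2,
                           (if (p.1 == 0) = true then (0 : Int)
                            else ((PySem.List.pyGetD st.2 (-1) PySem.Dict.empty).getD key ((0 : Int), (0 : Int))).2) +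
                             ((PySem.Dict.mk ((PySem.Dict.mk p.2).getD key [])).getD "time" []).length)))
                    (st.1, PySem.Dict.empty) keys).2]))
        (PySem.Dict.mk (keys.map (fun k => (k, v k))), acc) (PySem.List.enumerate days s)
        = (PySem.Dict.mk (keys.map (fun k =>
             (k, days.foldl (fun m day => ((PySem.Dict.mk day).getD k []).foldl pvFeatStep m) (v k)))),
           acc ++ pvIdx keys start days) := by
  intro days
  induction days with
  | nil =>
      intro s hs v acc start hstart
      simp [pvIdx]
  | cons day t ih =>
      intro s hs v acc start hstart
      rw [PySem.List.enumerate_cons]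
      simp only [List.foldl_cons]
      rw [PySem.List.foldl_prod_mk
        (fun (c : PySem.Dict String (PySem.Dict String (List Int))) (key : String) =>
          List.foldl (fun conc fv => conc.insert key (pvFeatStep (conc.getD key PySem.Dict.empty) fv))
            c ((PySem.Dict.mk day).getD key []))
        (fun (info : PySem.Dict String (Int × Int)) (key : String) =>
          info.insert key
            (if (s == 0) = true then (0 : Int)
             else ((PySem.List.pyGetD acc (-1) PySem.Dict.empty).getD key ((0 : Int), (0 : Int))).2,
             (if (s == 0) = true then (0 : Int)
              else ((PySem.List.pyGetD acc (-1) PySem.Dict.empty).getD key ((0 : Int), (0 : Int))).2) +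
               ((PySem.Dict.mk ((PySem.Dict.mk day).getD key [])).getD "time" []).length))
        keys (PySem.Dict.mk (keys.map (fun k => (k, v k)))) PySem.Dict.empty]
      have hconc :
          List.foldl
            (fun c key =>
              List.foldl (fun conc fv => conc.insert key (pvFeatStep (conc.getD key PySem.Dict.empty) fv))
                c ((PySem.Dict.mk day).getD key []))
            (PySem.Dict.mk (keys.map (fun k => (k, v k)))) keys
          = PySem.Dict.mk (keys.map (fun k =>
              (k, ((PySem.Dict.mk day).getD k []).foldl pvFeatStep (v k)))) := by
        simpa using pv_conc_day_gen day keys [] v hk (by simp)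
      have hinfo :
          List.foldl
            (fun (info : PySem.Dict String (Int × Int)) key =>
              info.insert key
                (if (s == 0) = true then (0 : Int)
                 else ((PySem.List.pyGetD acc (-1) PySem.Dict.empty).getD key ((0 : Int), (0 : Int))).2,
                 (if (s == 0) = true then (0 : Int)
                  else ((PySem.List.pyGetD acc (-1) PySem.Dict.empty).getD key ((0 : Int), (0 : Int))).2) +
                   ((PySem.Dict.mk ((PySem.Dict.mk day).getD key [])).getD "time" []).length))
            PySem.Dict.empty keys
          = PySem.Dict.mk (keys.map (fun k => (k, (start k, start k + pvL day k)))) := by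
        rw [pv_foldl_insert_eq_mk' keys hk]
        congr 1
        refine List.map_congr_left ?_
        intro k hkm
        rw [hstart k hkm]
        simp [pvL]
      rw [hconc, hinfo]
      rw [ih (s + 1) (by omega)
        (fun k => ((PySem.Dict.mk day).getD k []).foldl pvFeatStep (v k))
        (acc ++ [PySem.Dict.mk (keys.map (fun k => (k, (start k, start k + pvL day k))))])
        (fun k => start k + pvL day k)
        (by
          intro k hkm
          have h1 : ((s + 1 : Int) == 0) = false := beq_eq_false_iff_ne.mpr (by omega)
          simp [h1, PySem.List.pyGetD_neg_one_append_singleton, pv_getD_mk_map _ _ hk hkm])]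
      rw [pvIdx, ← List.append_cons]

lemma pv_A_eq_canon (first : List (String × List (String × List Int)))
    (rest : List (List (String × List (String × List Int))))
    (hk : (first.map (fun x => x.1)).Nodup) :
    concatenate_loaded_data (first :: rest) = pvCanon first rest := by
  simp only [concatenate_loaded_data, PySem.Dict.keys_mk]
  rw [pv_foldl_insert_eq_mk' _ hk (fun _ => (PySem.Dict.empty : PySem.Dict String (List Int)))]
  rw [pv_A_loop (first.map (fun x => x.1)) hk (first :: rest) 0 (le_refl 0)
    (fun _ => PySem.Dict.empty) [] (fun _ => 0) (by intro k _; simp)]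
  simp [pvCanon, pvMergeAll, List.map_map, Function.comp_def]

-- ===== VERDICT (by name: the statement is the Claim_ definition above) =====
theorem concatenate_loaded_data_spec : Claim_equal_concatenate_loaded_data := by
  intro sources _ hpre
  unfold Spec_concatenate_loaded_data
  cases sources with
  | nil => exact absurd rfl hpre.1
  | cons first rest =>
      have hk : (first.map (fun x => x.1)).Nodup := by
        simpa using (hpre.2.1 first (List.mem_cons_self)).1
      rw [pv_A_eq_canon first rest hk, pv_alt_eq_canon first rest hk]
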